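-- pv_equiv track=rewrite | github.com/JaydenPears/Colonization | backend.py | get_right_and_left_pos
-- ===== SOURCE A (Python) =====
-- def get_right_and_left_pos(matrix, number):
--     first_pos = second_pos = None
--     flag = False
--     for i in range(len(matrix)):
--         if flag:
--             break
--         for j in range(len(matrix[i])):
--             if matrix[i][j] == number:
--                 first_pos = [j, i]
--                 flag = True
--                 break
--     flag = False
--     for i in range(len(matrix) - 1, -1, -1):
--         if flag:
--             break
--         for j in range(len(matrix[i]) - 1, -1, -1):
--             if matrix[i][j] == number:
--                 second_pos = [j, i]
--                 flag = True
--                 break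
--     return [first_pos, second_pos]
-- ===== SOURCE B (Python) =====
-- def get_right_and_left_pos(matrix, number):
--     first = last = None
--     for i, row in enumerate(matrix):
--         for j, x in enumerate(row):
--             if x == number:
--                 if first is None:
--                     first = [j, i]
--                 last = [j, i]
--     return [first, last]
-- ===== Notes on version B (the rewrite author's own statement) =====
-- stated objective: simpler
-- what changed: Replaces A's two opposite-direction early-exit scans (forward for the first match, backward for the last) by one forward row-major pass that sets first once and keeps overwriting last.
import Mathlib
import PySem

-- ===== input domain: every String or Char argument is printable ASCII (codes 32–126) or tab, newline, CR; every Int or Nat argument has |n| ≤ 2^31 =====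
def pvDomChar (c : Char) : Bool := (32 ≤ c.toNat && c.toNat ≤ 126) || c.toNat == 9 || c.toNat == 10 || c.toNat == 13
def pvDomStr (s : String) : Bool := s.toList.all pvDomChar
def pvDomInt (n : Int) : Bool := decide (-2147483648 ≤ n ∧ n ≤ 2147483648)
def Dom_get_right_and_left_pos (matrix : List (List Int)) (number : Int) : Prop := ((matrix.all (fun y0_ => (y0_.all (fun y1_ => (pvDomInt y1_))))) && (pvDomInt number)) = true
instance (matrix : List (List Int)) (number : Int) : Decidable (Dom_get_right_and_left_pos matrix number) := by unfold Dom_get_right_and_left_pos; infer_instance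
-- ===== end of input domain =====

-- Single forward row-major pass (first set once, last overwritten) instead of A's two
-- opposite-direction early-exit scans; objective: simpler. (No speed claim.)

-- ===== PORT A =====
-- forward scan of one row: first index j with row[j] == number
def pvRowFirstA (row : List Int) (number : Int) (j : Nat) : Option Nat :=
  match row with
  | [] => none
  | x :: xs => if x = number then some j else pvRowFirstA xs number (j + 1)

-- A's first double loop: first matching cell in row-major order, with early exit
def pvFirstA (matrix : List (List Int)) (number : Int) (i : Nat) : Option (List Int) :=
  match matrix with
  | [] => none
  | r :: rest =>
    match pvRowFirstA r number 0 with
    | some j => some [(j : Int), (i : Int)]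
    | none => pvFirstA rest number (i + 1)

-- backward scan of one row: last index j with row[j] == number (later cells first)
def pvRowLastA (row : List Int) (number : Int) (j : Nat) : Option Nat :=
  match row with
  | [] => none
  | x :: xs =>
    match pvRowLastA xs number (j + 1) with
    | some r => some r
    | none => if x = number then some j else none

-- A's second double loop: rows from the end, cells from the end, early exit
def pvLastA (matrix : List (List Int)) (number : Int) (i : Nat) : Option (List Int) :=
  match matrix with
  | [] => none
  | r :: rest =>
    match pvLastA rest number (i + 1) with
    | some p => some p
    | none =>
      match pvRowLastA r number 0 with
      | some j => some [(j : Int), (i : Int)]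
      | none => none

def get_right_and_left_pos (matrix : List (List Int)) (number : Int) : List (Option (List Int)) :=
  [pvFirstA matrix number 0, pvLastA matrix number 0]

-- ===== PORT B =====
-- inner loop of B: update (first, last) across one row
def pvRowB (row : List Int) (number : Int) (i j : Nat)
    (st : Option (List Int) × Option (List Int)) : Option (List Int) × Option (List Int) :=
  match row with
  | [] => st
  | x :: xs =>
    if x = number then
      pvRowB xs number i (j + 1)
        ((if st.1 = none then some [(j : Int), (i : Int)] else st.1), some [(j : Int), (i : Int)])
    else
      pvRowB xs number i (j + 1) st

-- outer loop of B: fold the row update over all rows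
def pvScanB (matrix : List (List Int)) (number : Int) (i : Nat)
    (st : Option (List Int) × Option (List Int)) : Option (List Int) × Option (List Int) :=
  match matrix with
  | [] => st
  | r :: rest => pvScanB rest number (i + 1) (pvRowB r number i 0 st)

def get_right_and_left_pos_alt (matrix : List (List Int)) (number : Int) : List (Option (List Int)) :=
  let st := pvScanB matrix number 0 (none, none)
  [st.1, st.2]

-- ===== PRECONDITION & SPEC =====
def Spec_get_right_and_left_pos (matrix : List (List Int)) (number : Int) (out : List (Option (List Int))) : Prop := out = get_right_and_left_pos_alt matrix number
instance (matrix : List (List Int)) (number : Int) (out : List (Option (List Int))) : Decidable (Spec_get_right_and_left_pos matrix number out) := by unfold Spec_get_right_and_left_pos; infer_instance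

-- ===== CLAIM (what is proved, stated in full; the proofs are below) =====
def Claim_equal_get_right_and_left_pos : Prop := ∀ (matrix : List (List Int)) (number : Int), Dom_get_right_and_left_pos matrix number → Spec_get_right_and_left_pos matrix number (get_right_and_left_pos matrix number)

-- ===== LEMMAS AND PROOFS =====

-- one row of B's pass = (first filled from the row's first match if still empty,
--                        last overwritten by the row's last match if any)
theorem pvRowB_spec (row : List Int) (number : Int) (i : Nat) :
    ∀ (j : Nat) (st : Option (List Int) × Option (List Int)),
      pvRowB row number i j st =
        ((if st.1 = none then (pvRowFirstA row number j).map (fun k => [(k : Int), (i : Int)]) else st.1),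
         (match pvRowLastA row number j with
          | some k => some [(k : Int), (i : Int)]
          | none => st.2)) := by
  induction row with
  | nil => intro j st; rcases st with ⟨f, l⟩; cases f <;> simp [pvRowB, pvRowFirstA, pvRowLastA]
  | cons x xs ih =>
    intro j st
    by_cases hx : x = number
    · simp only [pvRowB, pvRowFirstA, pvRowLastA, hx, if_pos rfl]
      rw [ih]
      rcases hs : st.1 with _ | f
      · simp [hs]
        rcases pvRowLastA xs number (j + 1) with _ | k <;> simp
      · simp [hs]
        rcases pvRowLastA xs number (j + 1) with _ | k <;> simp
    · simp only [pvRowB, pvRowFirstA, pvRowLastA, if_neg hx]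
      rw [ih]
      rcases pvRowLastA xs number (j + 1) with _ | k <;> simp

-- the whole pass = (first filled from A's forward search if still empty,
--                   last = A's backward search if it finds anything)
theorem pvScanB_spec (matrix : List (List Int)) (number : Int) :
    ∀ (i : Nat) (st : Option (List Int) × Option (List Int)),
      pvScanB matrix number i st =
        ((if st.1 = none then pvFirstA matrix number i else st.1),
         (match pvLastA matrix number i with
          | some p => some p
          | none => st.2)) := by
  induction matrix with
  | nil => intro i st; rcases st with ⟨f, l⟩; cases f <;> simp [pvScanB, pvFirstA, pvLastA]
  | cons r rest ih =>
    intro i st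
    simp only [pvScanB, pvFirstA, pvLastA]
    rw [ih, pvRowB_spec]
    rcases hs : st.1 with _ | f
    · rcases hr : pvRowFirstA r number 0 with _ | k <;>
        rcases hl : pvLastA rest number (i + 1) with _ | p <;>
        rcases hrl : pvRowLastA r number 0 with _ | q <;> simp [hr, hl, hrl]
    · rcases hl : pvLastA rest number (i + 1) with _ | p <;>
        rcases hrl : pvRowLastA r number 0 with _ | q <;> simp [hl, hrl]

-- ===== VERDICT (by name: the statement is the Claim_ definition above) =====
theorem get_right_and_left_pos_spec : Claim_equal_get_right_and_left_pos := by
  intro matrix number _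
  unfold Spec_get_right_and_left_pos get_right_and_left_pos get_right_and_left_pos_alt
  rw [pvScanB_spec]
  rcases h : pvLastA matrix number 0 with _ | p <;> simp [h]
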